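-- pv_equiv track=rewrite | github.com/snidell/Data-Structures-and-Algorithms | hashtable/find_nearest_repeated_entry.py | find_nearest_rep
-- ===== SOURCE A (Python) =====
-- from typing import List
--
-- def find_nearest_rep(paragraph: List[str]) -> int:
--     word_to_latest_index: Dict[str,int] = {}
--     nearest_repeated_distance = float('inf')
--     for i, word in enumerate(paragraph):
--         if word in word_to_latest_index:
--             latest_equal_word = word_to_latest_index[word]
--             nearest_repeated_distance = min(nearest_repeated_distance,
--                                         i - latest_equal_word)
--         word_to_latest_index[word] = i
--
--     if nearest_repeated_distance != float('inf'):
--         return nearest_repeated_distance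
--     else:
--         return -1
-- ===== SOURCE B (Python) =====
-- from typing import List
--
-- def find_nearest_rep(paragraph: List[str]) -> int:
--     # Phase 1: full index word -> list of all positions (in order).
--     positions = {}
--     for i, word in enumerate(paragraph):
--         positions.setdefault(word, []).append(i)
--     # Phase 2: per group, minimum gap between consecutive positions.
--     best = None
--     for idxs in positions.values():
--         for a, b in zip(idxs, idxs[1:]):
--             if best is None or b - a < best:
--                 best = b - a
--     return best if best is not None else -1
-- ===== Notes on version B (the rewrite author's own statement) =====
-- stated objective: alternative
-- what changed: replaces A's single pass with an inline running minimum over a latest-index dict by a two-phase structure: first build a full word -> list-of-positions index, then scan each group's consecutive-position gaps for the global minimum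
import Mathlib
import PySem

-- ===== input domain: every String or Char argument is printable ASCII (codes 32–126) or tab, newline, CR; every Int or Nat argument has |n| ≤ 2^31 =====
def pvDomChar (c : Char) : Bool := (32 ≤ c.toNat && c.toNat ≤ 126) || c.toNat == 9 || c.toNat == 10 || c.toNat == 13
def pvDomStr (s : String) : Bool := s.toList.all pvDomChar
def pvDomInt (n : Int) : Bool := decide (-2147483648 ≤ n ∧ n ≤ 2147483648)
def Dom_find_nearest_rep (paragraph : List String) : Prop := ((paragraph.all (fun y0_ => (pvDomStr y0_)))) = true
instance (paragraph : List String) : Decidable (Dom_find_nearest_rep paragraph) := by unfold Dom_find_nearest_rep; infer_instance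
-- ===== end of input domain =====

-- B replaces A's single pass with a running minimum over a latest-index dict by a two-phase
-- build-full-position-index-then-scan-consecutive-gaps-per-group structure (alternative, same cost).

-- ===== PORT A =====
-- loop body of A's `for i, word in enumerate(paragraph)`; the float('inf') sentinel of
-- `nearest_repeated_distance` is modelled exactly by Option Int (none = inf; min(inf, x) = x).
def pvStepA (st : PySem.Dict String Int × Option Int) (iw : Int × String) :
    PySem.Dict String Int × Option Int :=
  match st.1.get? iw.2 with                    -- `if word in word_to_latest_index:` + `d[word]`
  | some j =>
      (st.1.insert iw.2 iw.1,
       some (match st.2 with | none => iw.1 - j | some m => min m (iw.1 - j)))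
  | none => (st.1.insert iw.2 iw.1, st.2)

def find_nearest_rep (paragraph : List String) : Int :=
  let st := (PySem.List.enumerate paragraph).foldl pvStepA (PySem.Dict.empty, none)
  match st.2 with
  | some m => m                                -- nearest_repeated_distance != inf
  | none => -1

-- ===== PORT B =====
-- phase 1 body: `positions.setdefault(word, []).append(i)`  (= d[word] = d.get(word, []) + [i])
def pvBuildStep (d : PySem.Dict String (List Int)) (iw : Int × String) :
    PySem.Dict String (List Int) :=
  d.modify iw.2 [] (fun l => l ++ [iw.1])

-- inner loop body: `for a, b in zip(idxs, idxs[1:])` with `best is None or b - a < best`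
def pvGapStep (best : Option Int) (ab : Int × Int) : Option Int :=
  match best with
  | none => some (ab.2 - ab.1)
  | some v => if ab.2 - ab.1 < v then some (ab.2 - ab.1) else some v

def pvGroupStep (best : Option Int) (idxs : List Int) : Option Int :=
  (idxs.zip idxs.tail).foldl pvGapStep best    -- idxs[1:] on a list = idxs.tail (exact)

def find_nearest_rep_alt (paragraph : List String) : Int :=
  let pos := (PySem.List.enumerate paragraph).foldl pvBuildStep PySem.Dict.empty
  let best := pos.values.foldl pvGroupStep none
  match best with
  | some v => v
  | none => -1

-- ===== PRECONDITION & SPEC =====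
def Spec_find_nearest_rep (paragraph : List String) (out : Int) : Prop := out = find_nearest_rep_alt paragraph
instance (paragraph : List String) (out : Int) : Decidable (Spec_find_nearest_rep paragraph out) := by unfold Spec_find_nearest_rep; infer_instance

-- ===== CLAIM (what is proved, stated in full; the proofs are below) =====
def Claim_equal_find_nearest_rep : Prop := ∀ (paragraph : List String), Dom_find_nearest_rep paragraph → Spec_find_nearest_rep paragraph (find_nearest_rep paragraph)

-- ===== LEMMAS AND PROOFS =====

-- running minimum with a none = +inf sentinel; both loops reduce to foldl pvOmin
def pvOmin (m : Option Int) (g : Int) : Option Int :=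
  some (match m with | none => g | some v => min v g)

-- the gaps A's loop feeds into its running minimum, in A's order
def pvGapsList : List (Int × String) → PySem.Dict String Int → List Int
  | [], _ => []
  | p :: t, d =>
      match d.get? p.2 with
      | some j => (p.1 - j) :: pvGapsList t (d.insert p.2 p.1)
      | none => pvGapsList t (d.insert p.2 p.1)

def pvInsD (d : PySem.Dict String Int) (l : List (Int × String)) : PySem.Dict String Int :=
  l.foldl (fun d p => d.insert p.2 p.1) d

def pvDiffs : List Int → List Int
  | a :: b :: t => (b - a) :: pvDiffs (b :: t)
  | _ => []

def pvIdxOf (w : String) (l : List (Int × String)) : List Int :=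
  (l.filter (fun p => p.2 == w)).map (·.1)

theorem pvFoldA (l : List (Int × String)) :
    ∀ (d : PySem.Dict String Int) (m : Option Int),
      l.foldl pvStepA (d, m) =
        (l.foldl (fun d p => d.insert p.2 p.1) d, (pvGapsList l d).foldl pvOmin m) := by
  induction l with
  | nil => intro d m; rfl
  | cons p t ih =>
      intro d m
      simp only [List.foldl_cons, pvStepA, pvGapsList]
      cases h : d.get? p.2 with
      | some j => simp only [ih, List.foldl_cons]; rfl
      | none => simp only [ih]

theorem pvGet?_insD (l : List (Int × String)) :
    ∀ (d : PySem.Dict String Int) (w : String),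
      (pvInsD d l).get? w =
        match (pvIdxOf w l).getLast? with
        | some j => some j
        | none => d.get? w := by
  induction l with
  | nil => intro d w; simp [pvInsD, pvIdxOf]
  | cons p t ih =>
      intro d w
      have hstep : pvInsD d (p :: t) = pvInsD (d.insert p.2 p.1) t := rfl
      rw [hstep, ih]
      by_cases hw : p.2 = w
      · subst hw
        have : pvIdxOf p.2 (p :: t) = p.1 :: pvIdxOf p.2 t := by
          simp [pvIdxOf]
        rw [this, List.getLast?_cons]
        cases h : (pvIdxOf p.2 t).getLast? with
        | some j => simp
        | none => simp [PySem.Dict.get?_insert_self]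
      · have : pvIdxOf w (p :: t) = pvIdxOf w t := by
          simp [pvIdxOf, hw]
        rw [this]
        cases h : (pvIdxOf w t).getLast? with
        | some j => simp
        | none => simp [PySem.Dict.get?_insert_of_ne d p.1 (fun hh => hw hh.symm)]

theorem pvGapsList_append (l : List (Int × String)) (x : Int × String) :
    ∀ (d : PySem.Dict String Int),
      pvGapsList (l ++ [x]) d =
        pvGapsList l d ++
          (match (pvInsD d l).get? x.2 with
           | some j => [x.1 - j]
           | none => []) := by
  induction l with
  | nil =>
      intro d
      show pvGapsList [x] d = _
      simp only [pvGapsList, pvInsD, List.foldl_nil]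
      cases h : d.get? x.2 <;> simp
  | cons p t ih =>
      intro d
      have hstep : pvInsD d (p :: t) = pvInsD (d.insert p.2 p.1) t := rfl
      simp only [List.cons_append, pvGapsList, hstep]
      cases h : d.get? p.2 with
      | some j => rw [ih]; rfl
      | none => rw [ih]

-- phase 1 of B: the dict really is the full position index
theorem pvGetD_pos (l : List (Int × String)) (w : String) :
    (l.foldl pvBuildStep PySem.Dict.empty).getD w [] = pvIdxOf w l := by
  have h1 : l.foldl pvBuildStep PySem.Dict.empty
      = (l.map Prod.swap).foldl (fun d q => d.modify q.1 [] (fun v => v ++ [q.2]))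
          PySem.Dict.empty := by
    rw [List.foldl_map]; rfl
  rw [h1, PySem.Dict.getD_foldl_modify_append]
  simp [pvIdxOf, List.filter_map, Function.comp_def, Prod.swap]

theorem pvNodup_keys_pos (l : List (Int × String)) :
    ∀ (d : PySem.Dict String (List Int)), d.keys.Nodup →
      (l.foldl pvBuildStep d).keys.Nodup := by
  induction l with
  | nil => intro d h; exact h
  | cons p t ih =>
      intro d h
      refine ih _ ?_
      rw [pvBuildStep, PySem.Dict.keys_modify]
      exact PySem.Dict.nodup_keys_insert _ _ _ h

theorem pvValues_eq (d : PySem.Dict String (List Int)) (h : d.keys.Nodup) :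
    d.values = d.keys.map (fun k => d.getD k []) := by
  obtain ⟨items⟩ := d
  show items.map (·.2) = (items.map (·.1)).map _
  rw [List.map_map]
  refine (List.map_congr_left ?_).symm
  intro p hp
  exact PySem.Dict.getD_of_mem_items _ (by simpa using hp) h []

theorem pvGapStep_eq (b : Option Int) (ab : Int × Int) :
    pvGapStep b ab = pvOmin b (ab.2 - ab.1) := by
  cases b with
  | none => rfl
  | some v =>
      simp only [pvGapStep, pvOmin]
      split_ifs with h
      · rw [min_eq_right h.le]
      · rw [min_eq_left (by omega)]

theorem pvZip_diffs (l : List Int) :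
    (l.zip l.tail).map (fun p => p.2 - p.1) = pvDiffs l := by
  induction l with
  | nil => rfl
  | cons a t ih =>
      cases t with
      | nil => rfl
      | cons b t' => simp only [List.tail_cons, List.zip_cons_cons, List.map_cons, pvDiffs]
                     rw [← ih]; rfl

theorem pvGroupStep_eq (b : Option Int) (idxs : List Int) :
    pvGroupStep b idxs = (pvDiffs idxs).foldl pvOmin b := by
  rw [pvGroupStep, ← pvZip_diffs, List.foldl_map]
  congr 1
  funext m p
  exact pvGapStep_eq m p

theorem pvFoldl_flatMap {α : Type} (ks : List α) (f : α → List Int) :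
    ∀ (b : Option Int),
      (ks.flatMap f).foldl pvOmin b = ks.foldl (fun b k => (f k).foldl pvOmin b) b := by
  induction ks with
  | nil => intro b; rfl
  | cons k t ih => intro b; simp only [List.flatMap_cons, List.foldl_append, List.foldl_cons, ih]

theorem pvCoe_flatMap {α : Type} (ks : List α) (f : α → List Int) :
    (↑(ks.flatMap f) : Multiset Int) = (ks.map (fun k => (↑(f k) : Multiset Int))).sum := by
  induction ks with
  | nil => rfl
  | cons k t ih => simp only [List.flatMap_cons, List.map_cons, List.sum_cons, ← ih,
                     Multiset.coe_add]

theorem pvDiffs_append (t : List Int) (n : Int) :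
    pvDiffs (t ++ [n]) =
      pvDiffs t ++ (match t.getLast? with | some j => [n - j] | none => []) := by
  induction t with
  | nil => rfl
  | cons a t' ih =>
      cases t' with
      | nil => rfl
      | cons b t'' =>
          simp only [List.cons_append, pvDiffs] at ih ⊢
          rw [ih, List.getLast?_cons (a := a), List.getLast?_cons (a := b)]
          simp

theorem pvSum_map_update {α : Type} [DecidableEq α] (ks : List α) (w : α)
    (f g : α → Multiset Int) (m : Multiset Int) :
    ks.Nodup → w ∈ ks → (∀ v ∈ ks, v ≠ w → g v = f v) → g w = f w + m →
      (ks.map g).sum = (ks.map f).sum + m := by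
  induction ks with
  | nil => intro _ h; cases h
  | cons k t ih =>
      intro hnd hw hne hgw
      simp only [List.map_cons, List.sum_cons]
      rcases List.mem_cons.mp hw with h | h
      · subst h
        have : t.map g = t.map f := List.map_congr_left (fun v hv =>
          hne v (List.mem_cons_of_mem _ hv)
            (fun hvk => (List.nodup_cons.mp hnd).1 (hvk ▸ hv)))
        rw [this, hgw]
        abel
      · have hk : k ≠ w := fun hkw => (List.nodup_cons.mp hnd).1 (hkw ▸ h)
        rw [hne k (List.mem_cons_self) hk,
          ih (List.nodup_cons.mp hnd).2 h (fun v hv => hne v (List.mem_cons_of_mem _ hv)) hgw]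
        abel

theorem pvFoldl_omin_perm {l1 l2 : List Int} (h : l1.Perm l2) :
    ∀ (b : Option Int), l1.foldl pvOmin b = l2.foldl pvOmin b := by
  induction h with
  | nil => intro b; rfl
  | cons x _ ih => intro b; simp only [List.foldl_cons, ih]
  | swap x y l =>
      intro b
      simp only [List.foldl_cons]
      have : pvOmin (pvOmin b y) x = pvOmin (pvOmin b x) y := by
        cases b <;> simp [pvOmin, min_comm, min_left_comm]
      rw [this]
  | trans _ _ ih1 ih2 => intro b; rw [ih1, ih2]

theorem pvIdxOf_append (w : String) (l : List (Int × String)) (x : Int × String) :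
    pvIdxOf w (l ++ [x]) = pvIdxOf w l ++ (if x.2 = w then [x.1] else []) := by
  simp only [pvIdxOf, List.filter_append, List.map_append, List.filter_cons, List.filter_nil]
  by_cases h : x.2 = w <;> simp [h]

-- core: A's gap list has the same multiset as B's per-group consecutive gaps
theorem pvCore (l : List (Int × String)) :
    (↑(pvGapsList l PySem.Dict.empty) : Multiset Int) =
      (((l.foldl pvBuildStep PySem.Dict.empty).keys).map
        (fun w => (↑(pvDiffs (pvIdxOf w l)) : Multiset Int))).sum := by
  induction l using List.reverseRecOn with
  | nil => simp [pvGapsList, PySem.Dict.keys_empty]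
  | append_singleton l x ih =>
      have hpos : (l ++ [x]).foldl pvBuildStep PySem.Dict.empty
          = pvBuildStep (l.foldl pvBuildStep PySem.Dict.empty) x := by
        rw [List.foldl_append, List.foldl_cons, List.foldl_nil]
      set pos := l.foldl pvBuildStep PySem.Dict.empty with hposdef
      have hnd : pos.keys.Nodup := pvNodup_keys_pos l _ PySem.Dict.nodup_keys_empty
      have hgetD : pos.getD x.2 [] = pvIdxOf x.2 l := pvGetD_pos l x.2
      have hidx_self : pvIdxOf x.2 (l ++ [x]) = pvIdxOf x.2 l ++ [x.1] := by
        rw [pvIdxOf_append]; simp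
      have hidx_ne : ∀ v, x.2 ≠ v → pvIdxOf v (l ++ [x]) = pvIdxOf v l := by
        intro v hv; rw [pvIdxOf_append]; simp [hv]
      have hlhs : pvGapsList (l ++ [x]) PySem.Dict.empty
          = pvGapsList l PySem.Dict.empty ++
            (match (pvIdxOf x.2 l).getLast? with | some j => [x.1 - j] | none => []) := by
        rw [pvGapsList_append, pvGet?_insD]
        cases h : (pvIdxOf x.2 l).getLast? <;> simp [PySem.Dict.get?_empty]
      by_cases hc : pos.contains x.2 = true
      · -- x.2 already a key: its group's list grows by x.1, keys unchanged
        have hkeys : (pvBuildStep pos x).keys = pos.keys := by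
          rw [pvBuildStep, PySem.Dict.keys_modify, PySem.Dict.keys_insert_of_contains _ _ hc]
        have hwmem : x.2 ∈ pos.keys := (PySem.Dict.contains_iff_mem_keys _ _).mp hc
        rw [hlhs, hpos, hkeys]
        rw [pvSum_map_update pos.keys x.2
          (fun w => (↑(pvDiffs (pvIdxOf w l)) : Multiset Int))
          (fun w => (↑(pvDiffs (pvIdxOf w (l ++ [x]))) : Multiset Int))
          (↑(match (pvIdxOf x.2 l).getLast? with
             | some j => [x.1 - j] | none => ([] : List Int)) : Multiset Int)
          hnd hwmem
          (fun v _ hv => by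
            show (↑(pvDiffs (pvIdxOf v (l ++ [x]))) : Multiset Int) = ↑(pvDiffs (pvIdxOf v l))
            rw [hidx_ne v (fun h => hv h.symm)])
          (by
            show (↑(pvDiffs (pvIdxOf x.2 (l ++ [x]))) : Multiset Int) = _
            rw [hidx_self, pvDiffs_append, ← Multiset.coe_add]
            cases (pvIdxOf x.2 l).getLast? <;> rfl)]
        rw [← ih, ← Multiset.coe_add]
        cases (pvIdxOf x.2 l).getLast? <;> rfl
      · -- x.2 is a new key: group [x.1] has no gap, keys gain x.2 at the end
        have hc' : pos.contains x.2 = false := by simpa using hc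
        have hkeys : (pvBuildStep pos x).keys = pos.keys ++ [x.2] := by
          rw [pvBuildStep, PySem.Dict.keys_modify, PySem.Dict.keys_insert_of_not_contains _ _ hc']
        have hempty : pvIdxOf x.2 l = [] := by
          rw [← hgetD]; exact PySem.Dict.getD_of_not_contains _ _ hc'
        have hextra : (match (pvIdxOf x.2 l).getLast? with
            | some j => [x.1 - j] | none => ([] : List Int)) = [] := by
          rw [hempty]; rfl
        have hmap : pos.keys.map (fun w => (↑(pvDiffs (pvIdxOf w (l ++ [x]))) : Multiset Int))
            = pos.keys.map (fun w => (↑(pvDiffs (pvIdxOf w l)) : Multiset Int)) := by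
          refine List.map_congr_left (fun v hv => ?_)
          have hvne : x.2 ≠ v := fun h => hc ((PySem.Dict.contains_iff_mem_keys _ _).mpr (h ▸ hv))
          rw [hidx_ne v hvne]
        have hdiffs_single : pvDiffs [x.1] = [] := rfl
        rw [hlhs, hextra, List.append_nil, hpos, hkeys, List.map_append, List.sum_append, hmap]
        simp [hidx_self, hempty, hdiffs_single, ← ih]

theorem pvBfold (pos : PySem.Dict String (List Int)) (hnd : pos.keys.Nodup) :
    pos.values.foldl pvGroupStep none =
      (pos.keys.flatMap (fun k => pvDiffs (pos.getD k []))).foldl pvOmin none := by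
  rw [pvValues_eq pos hnd, List.foldl_map, pvFoldl_flatMap]
  congr 1
  funext b k
  exact pvGroupStep_eq b (pos.getD k [])

-- ===== VERDICT (by name: the statement is the Claim_ definition above) =====
theorem find_nearest_rep_spec : Claim_equal_find_nearest_rep := by
  intro paragraph _
  unfold Spec_find_nearest_rep find_nearest_rep find_nearest_rep_alt
  set e := PySem.List.enumerate paragraph with he
  set pos := e.foldl pvBuildStep PySem.Dict.empty with hpos
  have hnd : pos.keys.Nodup := pvNodup_keys_pos e _ PySem.Dict.nodup_keys_empty
  have hA : (e.foldl pvStepA (PySem.Dict.empty, none)).2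
      = (pvGapsList e PySem.Dict.empty).foldl pvOmin none := by
    rw [pvFoldA]
  have hB : pos.values.foldl pvGroupStep none
      = (pos.keys.flatMap (fun k => pvDiffs (pvIdxOf k e))).foldl pvOmin none := by
    rw [pvBfold pos hnd]
    congr 1
    refine List.flatMap_congr (fun k _ => ?_)
    rw [hpos, pvGetD_pos]
  have hperm : (pvGapsList e PySem.Dict.empty).Perm
      (pos.keys.flatMap (fun k => pvDiffs (pvIdxOf k e))) := by
    rw [← Multiset.coe_eq_coe, pvCoe_flatMap, pvCore]
  have : (e.foldl pvStepA (PySem.Dict.empty, none)).2 = pos.values.foldl pvGroupStep none := by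
    rw [hA, hB, pvFoldl_omin_perm hperm]
  simp only [this]
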